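-- pv_equiv track=rewrite | github.com/Sakshiieee/python2 | pgm8.py | process_expression
-- ===== SOURCE A (Python) =====
-- def get_index_comma(string):
--     index_list = []
--     par_count = 0
--     for i in range(len(string)):
--         if string[i] == ',' and par_count == 0:
--             index_list.append(i)
--         elif string[i] == '(':
--             par_count += 1
--         elif string[i] == ')':
--             par_count -= 1
--     return index_list
--
-- def process_expression(expr):
--     expr = expr.replace(' ', '')
--     index = None
--     for i in range(len(expr)):
--         if expr[i] == '(':
--             index = i
--             break
--     if index is None:
--         return expr, []
--     predicate_symbol = expr[:index]
--     expr = expr[index + 1:len(expr) - 1]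
--     arg_list = []
--     indices = get_index_comma(expr)
--     if len(indices) == 0:
--         arg_list.append(expr)
--     else:
--         arg_list.append(expr[:indices[0]])
--         for i, j in zip(indices, indices[1:]):
--             arg_list.append(expr[i + 1:j])
--         arg_list.append(expr[indices[-1] + 1:])
--     return predicate_symbol, arg_list
-- ===== SOURCE B (Python) =====
-- def process_expression(expr):
--     expr = expr.replace(' ', '')
--     index = expr.find('(')
--     if index == -1:
--         return expr, []
--     predicate_symbol = expr[:index]
--     inner = expr[index + 1:len(expr) - 1]
--     arg_list = []
--     buf = []
--     depth = 0
--     for ch in inner: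
--         if ch == '(':
--             buf.append(ch)
--             depth += 1
--         elif ch == ')':
--             buf.append(ch)
--             depth -= 1
--         elif ch == ',' and depth == 0:
--             arg_list.append(''.join(buf))
--             buf = []
--         else:
--             buf.append(ch)
--     arg_list.append(''.join(buf))
--     return predicate_symbol, arg_list
-- ===== Notes on version B (the rewrite author's own statement) =====
-- stated objective: simpler
-- what changed: Replaced the separate comma-index-table pass (get_index_comma) plus the zip-based slicing loop with a single buffered depth-tracking scan over the inner string that emits each top-level argument directly, and the break-search loop for the first opening parenthesis with str.find.
import Mathlib
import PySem

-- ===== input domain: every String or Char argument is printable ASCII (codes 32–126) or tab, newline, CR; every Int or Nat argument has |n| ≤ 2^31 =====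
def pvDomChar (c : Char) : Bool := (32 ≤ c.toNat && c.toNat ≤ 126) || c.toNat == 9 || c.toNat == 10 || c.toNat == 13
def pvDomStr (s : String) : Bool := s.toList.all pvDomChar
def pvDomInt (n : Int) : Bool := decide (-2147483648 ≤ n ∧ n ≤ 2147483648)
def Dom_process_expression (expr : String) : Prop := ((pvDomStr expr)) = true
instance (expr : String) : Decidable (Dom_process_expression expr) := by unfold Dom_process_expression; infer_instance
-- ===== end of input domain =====

-- B replaces A's comma-index-table pass (get_index_comma) plus the zip-based slicing loop with a
-- single buffered depth-tracking scan that emits each top-level argument directly (objective: simpler).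

-- ===== PORT A =====

-- A helper get_index_comma: 'for i in range(len(string))' building (index_list, par_count)
def get_index_comma (s : List Char) : List Int :=
  ((PySem.List.pyRange 0 (PySem.List.len s) 1).foldl
    (fun (st : List Int × Int) i =>
      if PySem.List.pyGetD s i ' ' = ',' ∧ st.2 = 0 then (st.1 ++ [i], st.2)
      else if PySem.List.pyGetD s i ' ' = '(' then (st.1, st.2 + 1)
      else if PySem.List.pyGetD s i ' ' = ')' then (st.1, st.2 - 1)
      else st) ([], 0)).1

-- A's index-search loop over expr with early break at the first opening parenthesis
def pe_findIdx : List Char → Int → Option Int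
  | [], _ => none
  | c :: cs, i => if c = '(' then some i else pe_findIdx cs (i + 1)

-- A's arg_list construction: 'if len(indices) == 0' else head slice, zip loop, tail slice
def peArgs (cs : List Char) (idxs : List Int) : List (List Char) :=
  if idxs = [] then [cs]
  else PySem.List.slice cs none (some (PySem.List.pyGetD idxs 0 0)) ::
    ((idxs.zip idxs.tail).foldl
      (fun acc (p : Int × Int) => acc ++ [PySem.List.slice cs (some (p.1 + 1)) (some p.2)]) [])
    ++ [PySem.List.slice cs (some (PySem.List.pyGetD idxs (-1) 0 + 1)) none]

def process_expression (expr : String) : String × List String :=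
  let e := PySem.Str.replace expr " " ""
  match pe_findIdx e.toList 0 with
  | none => (e, [])
  | some index =>
    let predicate := PySem.List.slice e.toList none (some index)
    let inner := PySem.List.slice e.toList (some (index + 1)) (some (PySem.List.len e.toList - 1))
    let indices := get_index_comma inner
    (String.ofList predicate, (peArgs inner indices).map String.ofList)

-- ===== PORT B =====

-- B's loop body: parens are pushed and tracked as depth, a top-level comma emits the buffer
def bStep (st : List (List Char) × List Char × Int) (ch : Char) : List (List Char) × List Char × Int :=
  if ch = '(' then (st.1, st.2.1 ++ [ch], st.2.2 + 1)
  else if ch = ')' then (st.1, st.2.1 ++ [ch], st.2.2 - 1)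
  else if ch = ',' ∧ st.2.2 = 0 then (st.1 ++ [st.2.1], [], st.2.2)
  else (st.1, st.2.1 ++ [ch], st.2.2)

def process_expression_alt (expr : String) : String × List String :=
  let e := PySem.Str.replace expr " " ""
  let index := PySem.Chars.find e.toList ['(']
  if index = -1 then (e, [])
  else
    let predicate := PySem.List.slice e.toList none (some index)
    let inner := PySem.List.slice e.toList (some (index + 1)) (some (PySem.List.len e.toList - 1))
    let st := inner.foldl bStep ([], [], 0)
    (String.ofList predicate, (st.1 ++ [st.2.1]).map String.ofList)

-- ===== PRECONDITION & SPEC =====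
def Spec_process_expression (expr : String) (out : String × List String) : Prop := out = process_expression_alt expr
instance (expr : String) (out : String × List String) : Decidable (Spec_process_expression expr out) := by unfold Spec_process_expression; infer_instance

-- ===== CLAIM (what is proved, stated in full; the proofs are below) =====
def Claim_equal_process_expression : Prop := ∀ (expr : String), Dom_process_expression expr → Spec_process_expression expr (process_expression expr)

-- ===== LEMMAS AND PROOFS =====

def commaIdx : List Char → Int → Int → List Int
  | [], _, _ => []
  | c :: cs, i, d =>
    if c = ',' ∧ d = 0 then i :: commaIdx cs (i + 1) d
    else if c = '(' then commaIdx cs (i + 1) (d + 1)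
    else if c = ')' then commaIdx cs (i + 1) (d - 1)
    else commaIdx cs (i + 1) d

lemma commaIdx_shift (cs : List Char) (i d : Int) :
    commaIdx cs (i + 1) d = (commaIdx cs i d).map (· + 1) := by
  induction cs generalizing i d with
  | nil => simp [commaIdx]
  | cons c cs ih =>
    simp only [commaIdx]
    split_ifs <;> simp [ih]

lemma commaIdx_nonneg (cs : List Char) (i d : Int) {x : Int} (hx : x ∈ commaIdx cs i d) : i ≤ x := by
  induction cs generalizing i d with
  | nil => simp [commaIdx] at hx
  | cons c cs ih =>
    simp only [commaIdx] at hx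
    split_ifs at hx with h1 h2 h3
    · rcases List.mem_cons.mp hx with rfl | hx
      · exact le_refl x
      · exact le_trans (by omega) (ih _ _ hx)
    all_goals exact le_trans (by omega) (ih _ _ hx)
def gicStep (st : List Int × Int) (p : Int × Char) : List Int × Int :=
  if p.2 = ',' ∧ st.2 = 0 then (st.1 ++ [p.1], st.2)
  else if p.2 = '(' then (st.1, st.2 + 1)
  else if p.2 = ')' then (st.1, st.2 - 1)
  else st

lemma gic_enum (cs : List Char) (i : Int) (st : List Int × Int) :
    ((PySem.List.enumerate cs i).foldl gicStep st).1 = st.1 ++ commaIdx cs i st.2 := by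
  induction cs generalizing i st with
  | nil => simp [PySem.List.enumerate_nil, commaIdx]
  | cons c cs ih =>
    rw [PySem.List.enumerate_cons, List.foldl_cons]
    simp only [commaIdx, gicStep]
    split_ifs <;> simp [ih, List.append_assoc]

lemma get_index_comma_eq (s : List Char) : get_index_comma s = commaIdx s 0 0 := by
  have h1 : PySem.List.enumerate s 0 = (PySem.List.pyRange 0 (PySem.List.len s) 1).map
      (fun j => (j, PySem.List.pyGetD s j ' ')) := PySem.List.enumerate_eq_map_pyRange s ' '
  have h2 := gic_enum s 0 ([], 0)
  rw [h1, List.foldl_map] at h2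
  simpa [gicStep, get_index_comma] using h2
def peSplit : List Char → Int → List (List Char)
  | [], _ => [[]]
  | c :: cs, d =>
    if c = ',' ∧ d = 0 then [] :: peSplit cs d
    else if c = '(' then (peSplit cs (d + 1)).modifyHead (c :: ·)
    else if c = ')' then (peSplit cs (d - 1)).modifyHead (c :: ·)
    else (peSplit cs d).modifyHead (c :: ·)

lemma foldB (cs : List Char) (acc : List (List Char)) (buf : List Char) (d : Int) :
    (cs.foldl bStep (acc, buf, d)).1 ++ [(cs.foldl bStep (acc, buf, d)).2.1]
      = acc ++ (peSplit cs d).modifyHead (buf ++ ·) := by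
  induction cs generalizing acc buf d with
  | nil => simp [peSplit]
  | cons c cs ih =>
    rw [List.foldl_cons]
    simp only [bStep]
    split_ifs with h1 h2 h3
    · rw [ih]
      subst h1
      have hp : peSplit ('(' :: cs) d = (peSplit cs (d + 1)).modifyHead (('(' : Char) :: ·) := by
        simp [peSplit]
      rw [hp]
      cases h : peSplit cs (d + 1) <;> simp
    · rw [ih]
      subst h2
      have hp : peSplit (')' :: cs) d = (peSplit cs (d - 1)).modifyHead ((')' : Char) :: ·) := by
        simp [peSplit]
      rw [hp]
      cases h : peSplit cs (d - 1) <;> simp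
    · rw [ih]
      have hp : peSplit (c :: cs) d = [] :: peSplit cs d := by
        simp only [peSplit]
        rw [if_pos h3]
      rw [hp]
      cases h : peSplit cs d <;> simp [List.append_assoc]
    · rw [ih]
      have hp : peSplit (c :: cs) d = (peSplit cs d).modifyHead (c :: ·) := by
        simp only [peSplit]
        rw [if_neg h3, if_neg h1, if_neg h2]
      rw [hp]
      cases h : peSplit cs d <;> simp
lemma slice_to_shift (c : Char) (cs : List Char) (j : Int) (hj : 0 ≤ j) :
    PySem.List.slice (c :: cs) none (some (j + 1)) = c :: PySem.List.slice cs none (some j) := by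
  rw [PySem.List.slice_to _ (by omega), PySem.List.slice_to _ hj]
  have h : (j + 1).toNat = j.toNat + 1 := by omega
  rw [h, List.take_succ_cons]

lemma slice_mid_shift (c : Char) (cs : List Char) (a b : Int) (ha : 0 ≤ a) (hb : 0 ≤ b) :
    PySem.List.slice (c :: cs) (some (a + 1)) (some (b + 1)) = PySem.List.slice cs (some a) (some b) := by
  rw [PySem.List.slice_toNat _ (by omega) (by omega), PySem.List.slice_toNat _ ha hb]
  have h1 : (a + 1).toNat = a.toNat + 1 := by omega
  have h2 : (b + 1).toNat - (a + 1).toNat = b.toNat - a.toNat := by omega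
  rw [h2, h1, List.drop_succ_cons]

lemma slice_from_shift (c : Char) (cs : List Char) (a : Int) (ha : 0 ≤ a) :
    PySem.List.slice (c :: cs) (some (a + 1)) none = PySem.List.slice cs (some a) none := by
  rw [PySem.List.slice_from _ (by omega), PySem.List.slice_from _ ha]
  have h : (a + 1).toNat = a.toNat + 1 := by omega
  rw [h, List.drop_succ_cons]

lemma peArgs_eq_map (cs : List Char) (j : Int) (rest : List Int) :
    peArgs cs (j :: rest) =
      PySem.List.slice cs none (some j) ::
        ((j :: rest).zip rest).map (fun p => PySem.List.slice cs (some (p.1 + 1)) (some p.2))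
        ++ [PySem.List.slice cs (some (PySem.List.pyGetD (j :: rest) (-1) 0 + 1)) none] := by
  simp only [peArgs, if_neg (List.cons_ne_nil j rest)]
  rw [PySem.List.foldl_append_singleton_eq_map]
  simp [PySem.List.pyGetD_zero_cons]

lemma pyGetD_neg_one_map (js : List Int) (h : js ≠ []) :
    PySem.List.pyGetD (js.map (· + 1)) (-1) 0 = PySem.List.pyGetD js (-1) 0 + 1 := by
  rw [PySem.List.pyGetD_neg_one (js.map (· + 1)) 0 (by simpa using h),
      PySem.List.pyGetD_neg_one js 0 h, List.getLast_map]

lemma pyGetD_neg_one_nonneg (js : List Int) (h : js ≠ []) (hjs : ∀ x ∈ js, 0 ≤ x) :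
    0 ≤ PySem.List.pyGetD js (-1) 0 := by
  rw [PySem.List.pyGetD_neg_one js 0 h]
  exact hjs _ (List.getLast_mem h)

lemma mids_shift (c : Char) (cs : List Char) (js : List Int) (hjs : ∀ x ∈ js, 0 ≤ x) :
    ((js.map (· + 1)).zip (js.tail.map (· + 1))).map
        (fun p => PySem.List.slice (c :: cs) (some (p.1 + 1)) (some p.2))
      = (js.zip js.tail).map (fun p => PySem.List.slice cs (some (p.1 + 1)) (some p.2)) := by
  rw [List.zip_map, List.map_map]
  refine List.map_congr_left (fun p hp => ?_)
  have h1 : 0 ≤ p.1 := hjs _ (List.of_mem_zip hp).1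
  have h2 : 0 ≤ p.2 := hjs _ (List.mem_of_mem_tail (List.of_mem_zip hp).2)
  simp only [Function.comp_apply, Prod.map_fst, Prod.map_snd]
  exact slice_mid_shift c cs (p.1 + 1) p.2 (by omega) h2

lemma peArgs_shift (c : Char) (cs : List Char) (js : List Int) (hjs : ∀ x ∈ js, 0 ≤ x) :
    peArgs (c :: cs) (js.map (· + 1)) = (peArgs cs js).modifyHead (c :: ·) := by
  cases js with
  | nil => simp [peArgs]
  | cons j rest =>
    have hmap : (j :: rest).map (· + 1) = (j + 1) :: rest.map (· + 1) := rfl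
    rw [hmap, peArgs_eq_map, peArgs_eq_map]
    have hpg : PySem.List.pyGetD ((j + 1) :: rest.map (· + 1)) (-1) 0
        = PySem.List.pyGetD (j :: rest) (-1) 0 + 1 := pyGetD_neg_one_map (j :: rest) (by simp)
    rw [hpg]
    have hlastnn : 0 ≤ PySem.List.pyGetD (j :: rest) (-1) 0 :=
      pyGetD_neg_one_nonneg _ (by simp) hjs
    rw [slice_to_shift c cs j (hjs _ (by simp))]
    have hmid := mids_shift c cs (j :: rest) hjs
    simp only [List.tail_cons, hmap] at hmid
    rw [hmid]
    rw [slice_from_shift c cs (PySem.List.pyGetD (j :: rest) (-1) 0 + 1) (by omega)]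
    simp [List.modifyHead]

lemma peArgs_comma (cs : List Char) (js : List Int) (hjs : ∀ x ∈ js, 0 ≤ x) :
    peArgs (',' :: cs) ((0 : Int) :: js.map (· + 1)) = [] :: peArgs cs js := by
  cases js with
  | nil =>
    simp only [List.map_nil, peArgs_eq_map, List.zip_nil_right, List.map_nil]
    rw [PySem.List.slice_to _ (le_refl 0), PySem.List.pyGetD_neg_one [(0:Int)] 0 (by simp)]
    simp only [List.getLast_singleton]
    rw [PySem.List.slice_from _ (by omega)]
    simp [peArgs]
  | cons j rest =>
    have hmap : (j :: rest).map (· + 1) = (j + 1) :: rest.map (· + 1) := rfl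
    rw [hmap, peArgs_eq_map, peArgs_eq_map]
    -- head becomes []
    rw [PySem.List.slice_to _ (le_refl 0)]
    -- last index of 0 :: (j+1) :: rest+1
    have hlast : PySem.List.pyGetD ((0:Int) :: (j + 1) :: rest.map (· + 1)) (-1) 0
        = PySem.List.pyGetD (j :: rest) (-1) 0 + 1 := by
      rw [PySem.List.pyGetD_neg_one _ 0 (by simp), PySem.List.pyGetD_neg_one (j :: rest) 0 (by simp)]
      rw [List.getLast_cons (by simp)]
      have hgl : ((j + 1) :: rest.map (· + 1)).getLast (by simp)
          = ((j :: rest).map (· + 1)).getLast (by simp) := rfl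
      rw [hgl, List.getLast_map]
    rw [hlast]
    have hlastnn : 0 ≤ PySem.List.pyGetD (j :: rest) (-1) 0 :=
      pyGetD_neg_one_nonneg _ (by simp) hjs
    rw [slice_from_shift ',' cs (PySem.List.pyGetD (j :: rest) (-1) 0 + 1) (by omega)]
    -- zip part: (0 :: (j+1) :: rest+1).zip ((j+1) :: rest+1) = (0, j+1) :: ((j+1 :: rest+1).zip (rest+1))
    simp only [List.zip_cons_cons]
    rw [List.map_cons]
    have h0 : PySem.List.slice (',' :: cs) (some ((0:Int) + 1)) (some (j + 1))
        = PySem.List.slice cs none (some j) := by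
      rw [slice_mid_shift ',' cs 0 j (le_refl 0) (hjs _ (by simp))]
      simp
    rw [h0]
    have hmid := mids_shift ',' cs (j :: rest) hjs
    simp only [List.tail_cons, hmap] at hmid
    rw [hmid]
    simp

lemma peArgs_commaIdx (cs : List Char) (d : Int) :
    peArgs cs (commaIdx cs 0 d) = peSplit cs d := by
  induction cs generalizing d with
  | nil => simp [commaIdx, peArgs, peSplit]
  | cons c cs ih =>
    have hsh : commaIdx cs (0 + 1) d = (commaIdx cs 0 d).map (· + 1) := commaIdx_shift cs 0 d
    simp only [commaIdx, peSplit]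
    split_ifs with h1 h2 h3
    · -- comma at depth 0; note h1.1 : c = ','
      rw [h1.1, h1.2] at *
      rw [commaIdx_shift cs 0 0]
      rw [peArgs_comma cs _ (fun x hx => commaIdx_nonneg cs 0 0 hx), ih]
    · rw [commaIdx_shift cs 0 (d + 1),
        peArgs_shift c cs _ (fun x hx => commaIdx_nonneg cs 0 (d + 1) hx), ih]
    · rw [commaIdx_shift cs 0 (d - 1),
        peArgs_shift c cs _ (fun x hx => commaIdx_nonneg cs 0 (d - 1) hx), ih]
    · rw [commaIdx_shift cs 0 d,
        peArgs_shift c cs _ (fun x hx => commaIdx_nonneg cs 0 d hx), ih]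

lemma singleton_prefix_iff (c : Char) (l : List Char) : [c] <+: l ↔ l.head? = some c := by
  cases l with
  | nil => simp
  | cons x l => simp [List.cons_prefix_cons, eq_comm]

lemma find_paren (cs : List Char) :
    PySem.Chars.find cs ['('] =
      (match cs.findIdx? (· == '(') with | none => (-1 : Int) | some k => (k : Int)) := by
  cases h : cs.findIdx? (· == '(') with
  | none =>
    have hmem : '(' ∉ cs := by
      intro hm
      have := List.findIdx?_eq_none_iff.mp h '(' hm
      simp at this
    simp only []
    exact (PySem.Chars.find_eq_neg_one_iff _ _).mpr (by
      intro hinf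
      exact hmem ((List.singleton_infix_iff '(' cs).mp hinf))
  | some k =>
    obtain ⟨hk, hpk, hmin⟩ := List.findIdx?_eq_some_iff_getElem.mp h
    have hnonneg : 0 ≤ PySem.Chars.find cs ['('] := by
      rw [PySem.Chars.find_nonneg_iff _ _]
      exact (List.singleton_infix_iff '(' cs).mpr (by
        have : cs[k] = '(' := by simpa using hpk
        rw [← this]; exact List.getElem_mem hk)
    obtain ⟨hpre, hminf⟩ := PySem.Chars.find_spec hnonneg
    set f := (PySem.Chars.find cs ['(']).toNat with hfdef
    have hf1 : cs[f]? = some '(' := by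
      rw [← List.head?_drop]
      exact (singleton_prefix_iff _ _).mp hpre
    have hkf : ¬ (f < k) := by
      intro hlt
      have hfk : f < cs.length := (List.getElem?_eq_some_iff.mp hf1).1
      have : (· == '(') cs[f] = true := by
        have := (List.getElem?_eq_some_iff.mp hf1).2
        simp [this]
      exact hmin f hlt this
    have hfk2 : ¬ (k < f) := by
      intro hlt
      apply hminf k hlt
      rw [singleton_prefix_iff, List.head?_drop]
      have : cs[k] = '(' := by simpa using hpk
      exact List.getElem?_eq_some_iff.mpr ⟨hk, this⟩
    have : f = k := by omega
    simp only []
    omega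

lemma pe_findIdx_eq (cs : List Char) (i : Int) :
    pe_findIdx cs i = (cs.findIdx? (fun c => c == '(')).map (fun (k : Nat) => i + (k : Int)) := by
  induction cs generalizing i with
  | nil => simp [pe_findIdx]
  | cons c cs ih =>
    simp only [pe_findIdx, List.findIdx?_cons]
    by_cases h : c = '('
    · simp [h]
    · have hb : (c == '(') = false := by simp [h]
      rw [if_neg h, hb, ih]
      simp only [Bool.false_eq_true, if_false, Option.map_map]
      cases hfi : cs.findIdx? (fun c => c == '(') with
      | none => simp
      | some k =>
        simp only [Option.map_some, Function.comp_apply]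
        congr 1
        push_cast
        ring

lemma pe_findIdx_eq_find (cs : List Char) :
    pe_findIdx cs 0 = (if PySem.Chars.find cs ['('] = -1 then none
      else some (PySem.Chars.find cs ['('])) := by
  rw [pe_findIdx_eq, find_paren]
  cases h : cs.findIdx? (fun c => c == '(') with
  | none => simp
  | some k => simp

lemma args_eq (inner : List Char) :
    peArgs inner (get_index_comma inner)
      = (inner.foldl bStep ([], [], 0)).1 ++ [(inner.foldl bStep ([], [], 0)).2.1] := by
  rw [get_index_comma_eq, peArgs_commaIdx, foldB inner [] [] 0]
  cases h : peSplit inner 0 <;> simp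

-- ===== VERDICT (by name: the statement is the Claim_ definition above) =====
theorem process_expression_spec : Claim_equal_process_expression := by
  intro expr _
  unfold Spec_process_expression process_expression process_expression_alt
  simp only [pe_findIdx_eq_find]
  by_cases hf : PySem.Chars.find (PySem.Chars.replace expr.toList [' '] []) ['('] = -1
  · simp [hf]
  · simp [hf, args_eq]
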